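-- pv_equiv track=rewrite | github.com/LittleHeap/MyLeetCode | 439. Ternary Expression Parser.py | parseTernary
-- ===== SOURCE A (Python) =====
-- def parseTernary(expression: str) -> str:
--
--     s = []
--     for i in expression[::-1]:
--         if s and s[-1] == '?':
--             if i == 'T':
--                 s[-4:] = s[-2]
--             else:
--                 s[-4:] = s[-4]
--         else:
--             s.append(i)
--
--     return s[0]
-- ===== SOURCE B (Python) =====
-- def parseTernary(expression: str) -> str:
--     # Repeatedly reduce the expression at its rightmost '?' (which is always
--     # innermost: nothing to its right can contain a nested ternary), replacing
--     # the 5-character segment  cond ? x : y  by the chosen branch, until no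
--     # reducible '?' remains; then the answer is the last character.
--     s = expression
--     while True:
--         p = s.rfind('?')
--         if p <= 0:
--             return s[-1]
--         chosen = s[p + 1] if s[p - 1] == 'T' else s[p + 3]
--         s = s[:p - 1] + chosen + s[p + 4:]
-- ===== Notes on version B (the rewrite author's own statement) =====
-- stated objective: alternative
-- what changed: A simulates a right-to-left stack machine in one pass over the characters; B instead repeatedly rewrites the string itself, locating the rightmost '?' with rfind and splicing in the chosen branch until only the answer remains.
-- outside the precondition, e.g. on parseTernary(''): A raises IndexError, B raises IndexError; on parseTernary('T?a'): A returns 'a', B returns 'a'; on parseTernary('x?'): A raises IndexError, B raises IndexError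
import Mathlib
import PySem

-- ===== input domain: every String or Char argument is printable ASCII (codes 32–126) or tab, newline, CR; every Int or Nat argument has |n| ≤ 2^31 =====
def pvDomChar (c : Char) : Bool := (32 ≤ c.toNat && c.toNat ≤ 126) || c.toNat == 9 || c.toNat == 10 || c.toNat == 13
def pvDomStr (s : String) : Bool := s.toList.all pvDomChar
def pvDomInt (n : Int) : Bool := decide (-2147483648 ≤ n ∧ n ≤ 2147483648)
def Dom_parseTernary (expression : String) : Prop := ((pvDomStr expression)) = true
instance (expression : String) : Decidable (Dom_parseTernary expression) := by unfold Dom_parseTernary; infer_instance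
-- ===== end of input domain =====

-- B replaces A's one-pass right-to-left stack machine by repeated in-place string
-- rewriting at the rightmost '?' (a genuinely different traversal of the input).

-- ===== PORT A =====
-- A's loop over expression[::-1] with stack s (top = list head here):
-- s[-1] is st.head?, s[-2] is st[1]?, s[-4] is st[3]? (none = IndexError),
-- 's[-4:] = x' is 'x :: st.drop 4' (Python slice assignment clamps like drop).
def runA : List Char → List Char → Option (List Char)
  | [], st => some st
  | i :: rest, st =>
    if st.head? = some '?' then
      if i = 'T' then
        match st[1]? with
        | some v => runA rest (v :: st.drop 4)
        | none => none
      else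
        match st[3]? with
        | some v => runA rest (v :: st.drop 4)
        | none => none
    else runA rest (i :: st)

def parseTernary (expression : String) : String :=
  match runA expression.toList.reverse [] with
  | some st =>
    match st.getLast? with          -- 'return s[0]': bottom of the stack
    | some c => String.ofList [c]
    | none => ""                    -- s[0] of an empty stack: IndexError (outside Pre_)
  | none => ""                      -- IndexError inside the loop (outside Pre_)

-- ===== PORT B =====
-- s.rfind('?'): index of the last '?', -1 when absent (exact port of str.rfind
-- for a single-character needle, via the first hit in the reversed list)
def rfindQ (s : List Char) : Int :=
  match s.reverse.findIdx? (· == '?') with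
  | some i => (s.length : Int) - 1 - (i : Int)
  | none => -1

-- the 'while True' rewriting loop; fuel only makes the recursion total (each
-- rewrite removes a '?', so length + 1 iterations always suffice);
-- s[:p-1] / s[p+4:] are take / drop (Python slices clamp the same way)
def loopB : Nat → List Char → Option Char
  | 0, _ => none
  | fuel + 1, s =>
    let p := rfindQ s
    if p ≤ 0 then s.getLast?        -- 'return s[-1]' (none = IndexError, outside Pre_)
    else
      let pn := p.toNat
      match (if s[pn - 1]? = some 'T' then s[pn + 1]? else s[pn + 3]?) with
      | none => none                -- IndexError (outside Pre_)
      | some chosen => loopB fuel (s.take (pn - 1) ++ chosen :: s.drop (pn + 4))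

def parseTernary_alt (expression : String) : String :=
  match loopB (expression.toList.length + 1) expression.toList with
  | some c => String.ofList [c]
  | none => ""

-- ===== PRECONDITION & SPEC =====
-- Pre_: the expression is nonempty and every conditional '?' leaves at least four
-- characters of room once the reductions to its right are accounted for, so no
-- index ever falls off the end.  This no-IndexError margin is slightly
-- conservative: a 'T'-condition whose false branch is cut short by the string's
-- end still returns (via Python's slice clamping) but is excluded.
def Pre_parseTernary (expression : String) : Prop :=
  expression.toList ≠ [] ∧
  ∀ p < expression.toList.length,
    (expression.toList[p]? = some '?' ∧ 0 < p) →
      p + 4 * ((expression.toList.drop (p + 1)).count '?') + 4 ≤ expression.toList.length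

instance (expression : String) : Decidable (Pre_parseTernary expression) := by
  unfold Pre_parseTernary; infer_instance

def pvWitness_parseTernary : String := "T?2:F?3:4"

def Spec_parseTernary (expression : String) (out : String) : Prop := out = parseTernary_alt expression
instance (expression : String) (out : String) : Decidable (Spec_parseTernary expression out) := by
  unfold Spec_parseTernary; infer_instance

-- ===== CLAIM (what is proved, stated in full; the proofs are below) =====
def Claim_equal_parseTernary : Prop := ∀ (expression : String), Dom_parseTernary expression → Pre_parseTernary expression → Spec_parseTernary expression (parseTernary expression)

-- ===== LEMMAS AND PROOFS =====

theorem head?_ne_of_not_mem {u : List Char} (h : '?' ∉ u) : u.head? ≠ some '?' := by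
  cases u with
  | nil => simp
  | cons c t =>
    simp only [List.head?_cons, ne_eq, Option.some.injEq]
    intro hc
    exact h (hc ▸ List.mem_cons_self)

theorem runA_append (xs ys st : List Char) :
    runA (xs ++ ys) st = (runA xs st).bind (fun st' => runA ys st') := by
  induction xs generalizing st with
  | nil => simp [runA]
  | cons i rest ih =>
    simp only [List.cons_append, runA]
    split_ifs with h1 h2
    · cases st[1]? <;> simp [ih]
    · cases st[3]? <;> simp [ih]
    · exact ih _

-- a run over '?'-free input just pushes everything
theorem noq_run (v : List Char) (hv : '?' ∉ v) :
    ∀ st : List Char, st.head? ≠ some '?' → runA v st = some (v.reverse ++ st) := by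
  induction v with
  | nil => intro st _; simp [runA]
  | cons c t ih =>
    intro st hst
    have hc : c ≠ '?' := fun h => hv (h ▸ List.mem_cons_self)
    have ht : '?' ∉ t := fun h => hv (List.mem_cons_of_mem _ h)
    rw [show runA (c :: t) st = runA t (c :: st) from by simp [runA, hst]]
    rw [ih ht (c :: st) (by simp [hc])]
    simp

theorem noqs_run (u : List Char) (hu : '?' ∉ u) : runA u.reverse [] = some u := by
  have := noq_run u.reverse (by simpa using hu) [] (by simp)
  simpa using this

-- decompose a string at its last '?'
theorem split_last {s : List Char} (h : '?' ∈ s) :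
    ∃ a b, s = a ++ '?' :: b ∧ '?' ∉ b := by
  induction s with
  | nil => cases h
  | cons c t ih =>
    by_cases ht : '?' ∈ t
    · obtain ⟨a, b, rfl, hb⟩ := ih ht
      exact ⟨c :: a, b, rfl, hb⟩
    · have hc : c = '?' := by
        rcases List.mem_cons.mp h with h' | h'
        · exact h'.symm
        · exact absurd h' ht
      exact ⟨[], t, by simp [hc], ht⟩

theorem rfindQ_of_not_mem {s : List Char} (h : '?' ∉ s) : rfindQ s = -1 := by
  have : s.reverse.findIdx? (· == '?') = none := by
    rw [List.findIdx?_eq_none_iff]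
    intro x hx
    simp only [beq_eq_false_iff_ne, ne_eq]
    intro hxq
    exact h (hxq ▸ (List.mem_reverse.mp hx))
  simp [rfindQ, this]

theorem rfindQ_concat (a b : List Char) (hb : '?' ∉ b) :
    rfindQ (a ++ '?' :: b) = (a.length : Int) := by
  have hbrev : b.reverse.findIdx? (· == '?') = none := by
    rw [List.findIdx?_eq_none_iff]
    intro x hx
    simp only [beq_eq_false_iff_ne, ne_eq]
    intro hxq
    exact hb (hxq ▸ (List.mem_reverse.mp hx))
  have hrev : (a ++ '?' :: b).reverse = b.reverse ++ '?' :: a.reverse := by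
    simp
  have hfind : (a ++ '?' :: b).reverse.findIdx? (· == '?') = some b.length := by
    rw [hrev, List.findIdx?_append, hbrev]
    simp [List.findIdx?_cons]
  simp only [rfindQ, hfind]
  simp
  omega

-- the heart of the equivalence: on strings with the no-IndexError margin, the
-- stack machine's answer equals the rewriting loop's answer
theorem main_core : ∀ (fuel : Nat) (s : List Char),
    (∀ p < s.length, (s[p]? = some '?' ∧ 0 < p) →
        p + 4 * ((s.drop (p + 1)).count '?') + 4 ≤ s.length) →
    s.length < fuel →
    (runA s.reverse []).bind List.getLast? = loopB fuel s := by
  intro fuel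
  induction fuel with
  | zero => intro s _ h; omega
  | succ fu ih =>
    intro s hinv hlen
    by_cases hq : '?' ∈ s
    · obtain ⟨a0, b, rfl, hb⟩ := split_last hq
      rcases List.eq_nil_or_concat a0 with rfl | ⟨a, c, rfl⟩
      · -- the '?' is the first character: both sides return the last character
        have hfind : rfindQ ('?' :: b) = 0 := by
          simpa using rfindQ_concat [] b hb
        simp only [List.nil_append]
        rw [show loopB (fu + 1) ('?' :: b) = ('?' :: b).getLast? from by
          simp [loopB, hfind]]
        have hA : runA ('?' :: b).reverse [] = some ('?' :: b) := by
          simp only [List.reverse_cons]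
          rw [runA_append, noqs_run b hb]
          simp [runA, head?_ne_of_not_mem hb]
        rw [hA]
        simp
      · -- a conditional '?' with room: one machine reduction = one rewrite
        simp only [List.concat_eq_append, List.append_assoc, List.cons_append,
          List.nil_append] at hinv hlen ⊢
        -- the margin gives at least three characters after the '?'
        have hblen : 3 ≤ b.length := by
          have hp := hinv (a.length + 1) (by simp) ⟨by simp, by omega⟩
          have hd : (a ++ c :: '?' :: b).drop (a.length + 1 + 1) = b := by
            rw [show a.length + 1 + 1 = a.length + 2 from rfl]
            simp [List.drop_length_add_append (l₁ := a) (l₂ := c :: '?' :: b) 2]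
          rw [hd] at hp
          simp at hp
          omega
        obtain ⟨v1, v2, v3, b', rfl⟩ : ∃ v1 v2 v3 b', b = v1 :: v2 :: v3 :: b' := by
          match b, hblen with
          | v1 :: v2 :: v3 :: b', _ => exact ⟨v1, v2, v3, b', rfl⟩
        have hv1 : v1 ≠ '?' := fun h => hb (h ▸ List.mem_cons_self)
        have hv2 : v2 ≠ '?' := fun h => hb (by simp [h])
        have hv3 : v3 ≠ '?' := fun h => hb (by simp [h])
        have hb' : '?' ∉ b' := fun h => hb (by simp [h])
        set chosen := if c = 'T' then v1 else v3 with hch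
        -- both sides step to the same configuration
        have hA : runA (a ++ c :: '?' :: v1 :: v2 :: v3 :: b').reverse []
            = runA a.reverse (chosen :: b') := by
          rw [show (a ++ c :: '?' :: v1 :: v2 :: v3 :: b').reverse
              = (b'.reverse ++ [v3, v2, v1, '?', c]) ++ a.reverse from by simp]
          rw [runA_append, runA_append, noqs_run b' hb']
          simp only [Option.bind_some]
          rw [show runA [v3, v2, v1, '?', c] b' = some (chosen :: b') from by
            simp only [runA, head?_ne_of_not_mem hb', List.head?_cons, hv3, hv2, hv1,
              Option.some.injEq, reduceIte]
            by_cases hc : c = 'T' <;>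
              simp [hc, hch]]
          simp
        have hA' : runA ((a ++ chosen :: b')).reverse [] = runA a.reverse (chosen :: b') := by
          rw [show (a ++ chosen :: b').reverse = (b'.reverse ++ [chosen]) ++ a.reverse from by simp]
          rw [runA_append, runA_append, noqs_run b' hb']
          simp only [Option.bind_some]
          rw [show runA [chosen] b' = some (chosen :: b') from by
            simp [runA, head?_ne_of_not_mem hb']]
          simp
        -- B makes the same rewrite
        have hfind : rfindQ (a ++ c :: '?' :: v1 :: v2 :: v3 :: b') = (a.length : Int) + 1 := by
          have := rfindQ_concat (a ++ [c]) (v1 :: v2 :: v3 :: b') hb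
          simpa using this
        have hB : loopB (fu + 1) (a ++ c :: '?' :: v1 :: v2 :: v3 :: b')
            = loopB fu (a ++ chosen :: b') := by
          rw [show loopB (fu + 1) (a ++ c :: '?' :: v1 :: v2 :: v3 :: b')
              = if (rfindQ (a ++ c :: '?' :: v1 :: v2 :: v3 :: b')) ≤ 0 then
                  (a ++ c :: '?' :: v1 :: v2 :: v3 :: b').getLast?
                else _ from rfl]
          rw [hfind]
          rw [if_neg (by omega)]
          have hpn : ((a.length : Int) + 1).toNat = a.length + 1 := by omega
          have hgm1 : (a ++ c :: '?' :: v1 :: v2 :: v3 :: b')[a.length + 1 - 1]? = some c := by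
            rw [show a.length + 1 - 1 = a.length from rfl]
            rw [List.getElem?_append_right (le_refl _)]
            simp
          have hgp1 : (a ++ c :: '?' :: v1 :: v2 :: v3 :: b')[a.length + 1 + 1]? = some v1 := by
            rw [List.getElem?_append_right (by omega)]
            simp [show a.length + 1 + 1 - a.length = 2 from by omega]
          have hgp3 : (a ++ c :: '?' :: v1 :: v2 :: v3 :: b')[a.length + 1 + 3]? = some v3 := by
            rw [List.getElem?_append_right (by omega)]
            simp [show a.length + 1 + 3 - a.length = 4 from by omega]
          have htake : (a ++ c :: '?' :: v1 :: v2 :: v3 :: b').take (a.length + 1 - 1) = a := by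
            rw [show a.length + 1 - 1 = a.length from rfl]
            exact List.take_left
          have hdrop : (a ++ c :: '?' :: v1 :: v2 :: v3 :: b').drop (a.length + 1 + 4) = b' := by
            rw [show a.length + 1 + 4 = a.length + 5 from rfl]
            simp [List.drop_length_add_append
              (l₁ := a) (l₂ := c :: '?' :: v1 :: v2 :: v3 :: b') 5]
          rw [hpn, hgm1, hgp1, hgp3, htake, hdrop]
          by_cases hc : c = 'T' <;> simp [hc, hch]
        rw [hA, hB, ← hA']
        -- the rewritten string keeps the margin, so the induction applies
        refine ih (a ++ chosen :: b') ?_ (by simp at hlen ⊢; omega)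
        intro p hp ⟨hpq, hp0⟩
        have hpa : p < a.length := by
          by_contra hge
          rw [Nat.not_lt] at hge
          rw [List.getElem?_append_right hge] at hpq
          have hmem : '?' ∈ chosen :: b' := List.mem_of_getElem? hpq
          rcases List.mem_cons.mp hmem with h' | h'
          · rw [hch] at h'
            by_cases hc : c = 'T' <;> simp [hc] at h' <;> [exact hv1 h'.symm; exact hv3 h'.symm]
          · exact hb' h'
        have hpq' : (a ++ c :: '?' :: v1 :: v2 :: v3 :: b')[p]? = some '?' := by
          rw [List.getElem?_append_left hpa]
          rw [List.getElem?_append_left hpa] at hpq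
          exact hpq
        have hold := hinv p (by simp; omega) ⟨hpq', hp0⟩
        -- counting '?' to the right, before and after the rewrite
        have hd1 : (a ++ c :: '?' :: v1 :: v2 :: v3 :: b').drop (p + 1)
            = a.drop (p + 1) ++ c :: '?' :: v1 :: v2 :: v3 :: b' :=
          List.drop_append_of_le_length (by omega)
        have hd2 : (a ++ chosen :: b').drop (p + 1) = a.drop (p + 1) ++ chosen :: b' :=
          List.drop_append_of_le_length (by omega)
        rw [hd1, List.count_append] at hold
        rw [hd2, List.count_append]
        have hcb' : b'.count '?' = 0 := List.count_eq_zero.mpr hb'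
        have hccount : (c :: '?' :: v1 :: v2 :: v3 :: b').count '?'
            = (if c = '?' then 1 else 0) + 1 := by
          simp [List.count_cons, hv1, hv2, hv3, hcb']
          by_cases hc : c = '?' <;> simp [hc]
        have hchcount : (chosen :: b').count '?' = 0 := by
          have hchq : chosen ≠ '?' := by
            rw [hch]; by_cases hc : c = 'T' <;> simp [hc, hv1, hv3]
          simp [hchq, hcb']
        rw [hccount] at hold
        rw [hchcount]
        simp at hold hp ⊢
        by_cases hc : c = '?' <;> simp [hc] at hold <;> omega
    · -- no '?' at all: both sides return the last character
      have hfind : rfindQ s = -1 := rfindQ_of_not_mem hq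
      rw [show loopB (fu + 1) s = s.getLast? from by simp [loopB, hfind]]
      rw [noqs_run s hq]
      simp

-- ===== VERDICT (by name: the statement is the Claim_ definition above) =====
theorem parseTernary_spec : Claim_equal_parseTernary := by
  intro e _hdom hpre
  unfold Spec_parseTernary
  obtain ⟨-, hinv⟩ := hpre
  have h := main_core (e.toList.length + 1) e.toList hinv (by omega)
  unfold parseTernary parseTernary_alt
  rw [← h]
  cases hA : runA e.toList.reverse [] with
  | none => simp
  | some st => cases hst : st.getLast? <;> simp [hst]
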